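-- pv_equiv track=rewrite | github.com/tjhrad/advent_of_code | 2017/24/day24.py | find_strongest_longest
-- ===== SOURCE A (Python) =====
-- def find_strongest_longest(bridges):
--     max_len = max([len(a) for a in bridges])
--     strongest = 0
--     for bridge in bridges:
--         if len(bridge) != max_len:
--             continue
--         strength = 0
--         for c in bridge:
--             strength += c[0] + c[1]
--         if strength > strongest:
--             strongest = strength
--     return strongest
-- ===== SOURCE B (Python) =====
-- def find_strongest_longest(bridges):
--     # Single pass: track (current max length, best strength at that length).
--     best_len, best = -1, 0
--     for bridge in bridges:
--         L = len(bridge)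
--         if L > best_len:
--             best_len, best = L, 0
--         if L == best_len:
--             s = sum(x + y for x, y in bridge)
--             if s > best:
--                 best = s
--     return best
-- ===== Notes on version B (the rewrite author's own statement) =====
-- stated objective: alternative
-- what changed: Replaces A's two staged passes (first compute max_len over all bridges, then scan again for the best strength among bridges of that length) by a single pass that maintains a running (best_len, best strength) accumulator, resetting the strength when a longer bridge appears.
import Mathlib
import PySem

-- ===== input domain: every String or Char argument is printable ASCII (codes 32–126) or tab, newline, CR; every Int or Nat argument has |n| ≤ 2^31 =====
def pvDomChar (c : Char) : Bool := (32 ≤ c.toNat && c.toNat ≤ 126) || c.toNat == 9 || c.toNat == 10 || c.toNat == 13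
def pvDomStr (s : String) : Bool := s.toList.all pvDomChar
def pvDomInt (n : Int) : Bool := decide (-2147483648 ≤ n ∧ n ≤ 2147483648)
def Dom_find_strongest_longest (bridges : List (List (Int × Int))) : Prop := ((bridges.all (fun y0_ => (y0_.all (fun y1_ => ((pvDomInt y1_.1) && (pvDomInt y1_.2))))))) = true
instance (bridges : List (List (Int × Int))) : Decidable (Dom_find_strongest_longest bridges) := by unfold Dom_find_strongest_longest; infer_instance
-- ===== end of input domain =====

-- B replaces A's two staged passes (max length, then best strength among longest) by ONE pass
-- maintaining a running (best_len, best strength) accumulator (objective: alternative).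
-- ===== PORT A =====
def find_strongest_longest (bridges : List (List (Int × Int))) : Int :=
  -- max_len = max([len(a) for a in bridges]); Python max raises ValueError on [], excluded by Pre_
  let max_len : Int := ((bridges.map (fun a => (a.length : Int))).max?).getD 0
  bridges.foldl (fun strongest bridge =>
    if (bridge.length : Int) ≠ max_len then strongest
    else
      let strength := bridge.foldl (fun s c => s + c.1 + c.2) 0
      if strength > strongest then strength else strongest) 0

-- ===== PORT B =====
def find_strongest_longest_alt (bridges : List (List (Int × Int))) : Int :=
  (bridges.foldl (fun (st : Int × Int) bridge =>
    let L : Int := bridge.length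
    let st1 := if L > st.1 then (L, 0) else st
    if L == st1.1 then
      let s := bridge.foldl (fun acc p => acc + (p.1 + p.2)) 0
      if s > st1.2 then (st1.1, s) else st1
    else st1) (-1, 0)).2

-- ===== PRECONDITION & SPEC =====
-- Pre_ excludes only the empty list, on which A's max([...]) raises ValueError.
def Pre_find_strongest_longest (bridges : List (List (Int × Int))) : Prop := bridges ≠ []
instance (bridges : List (List (Int × Int))) : Decidable (Pre_find_strongest_longest bridges) := by unfold Pre_find_strongest_longest; infer_instance
def pvWitness_find_strongest_longest : (List (List (Int × Int))) := [[(0, 2)], [(2, 3), (3, 1)]]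
def Spec_find_strongest_longest (bridges : List (List (Int × Int))) (out : Int) : Prop := out = find_strongest_longest_alt bridges
instance (bridges : List (List (Int × Int))) (out : Int) : Decidable (Spec_find_strongest_longest bridges out) := by unfold Spec_find_strongest_longest; infer_instance

-- ===== CLAIM (what is proved, stated in full; the proofs are below) =====
def Claim_equal_find_strongest_longest : Prop := ∀ (bridges : List (List (Int × Int))), Dom_find_strongest_longest bridges → Pre_find_strongest_longest bridges → Spec_find_strongest_longest bridges (find_strongest_longest bridges)

-- ===== LEMMAS AND PROOFS =====

-- named copies of the two fold steps (identical to the lambdas in the ports)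
def fslStepB : Int × Int → List (Int × Int) → Int × Int := fun st bridge =>
  let L : Int := bridge.length
  let st1 := if L > st.1 then (L, 0) else st
  if L == st1.1 then
    let s := bridge.foldl (fun acc p => acc + (p.1 + p.2)) 0
    if s > st1.2 then (st1.1, s) else st1
  else st1

def fslStepA (ml : Int) : Int → List (Int × Int) → Int := fun strongest bridge =>
  if (bridge.length : Int) ≠ ml then strongest
  else
    let strength := bridge.foldl (fun s c => s + c.1 + c.2) 0
    if strength > strongest then strength else strongest

-- the two strength sums (A's `s + c.1 + c.2` vs B's `acc + (p.1 + p.2)`) agree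
theorem fsl_str_eq (b : List (Int × Int)) (a : Int) :
    b.foldl (fun s c => s + c.1 + c.2) a = b.foldl (fun acc p => acc + (p.1 + p.2)) a := by
  simp only [add_assoc]

theorem fsl_le_M (bs : List (List (Int × Int))) (l : Int) :
    l ≤ bs.foldl (fun m b => max m ((b.length : Int))) l := by
  induction bs generalizing l with
  | nil => exact le_refl _
  | cons b bs ih => exact le_trans (le_max_left _ _) (ih _)

-- characterisation of B's one-pass fold: it carries the running max length together with
-- the A-style best strength for that length.
theorem fsl_key (bs : List (List (Int × Int))) : ∀ (ml l s : Int),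
    ml = bs.foldl (fun m b => max m ((b.length : Int))) l →
    bs.foldl fslStepB (l, s)
      = (ml, bs.foldl (fslStepA ml) (if l = ml then s else 0)) := by
  induction bs with
  | nil =>
      intro ml l s h
      simp only [List.foldl_nil] at h ⊢
      subst h; simp
  | cons b bs ih =>
      intro ml l s h
      have hM : ml = bs.foldl (fun m b => max m ((b.length : Int))) (max l (b.length : Int)) := h
      have hLM : ((b.length : Int)) ≤ ml := by
        rw [hM]; exact le_trans (le_max_right _ _) (fsl_le_M _ _)
      have hsab : b.foldl (fun s c => s + c.1 + c.2) 0 = b.foldl (fun acc p => acc + (p.1 + p.2)) 0 :=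
        fsl_str_eq b 0
      simp only [List.foldl_cons]
      by_cases hgt : ((b.length : Int)) > l
      · -- longer bridge: reset length, strength becomes max 0 (strength of b)
        have hstep : fslStepB (l, s) b
            = ((b.length : Int), if b.foldl (fun acc p => acc + (p.1 + p.2)) 0 > 0 then
                b.foldl (fun acc p => acc + (p.1 + p.2)) 0 else 0) := by
          simp [fslStepB, hgt]; split <;> rfl
        have hlml : l ≠ ml := fun he => absurd hLM (by omega)
        have hmax : max l ((b.length : Int)) = (b.length : Int) := max_eq_right (le_of_lt hgt)
        rw [hstep, ih ml _ _ (by rw [hM, hmax])]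
        have hstepA : fslStepA ml (if l = ml then s else 0) b
            = (if ((b.length : Int)) = ml then
                (if b.foldl (fun acc p => acc + (p.1 + p.2)) 0 > 0 then
                  b.foldl (fun acc p => acc + (p.1 + p.2)) 0 else 0) else 0) := by
          simp only [fslStepA, hsab, if_neg hlml]
          by_cases hbml : ((b.length : Int)) = ml <;> simp [hbml]
        rw [hstepA]
      · have hle : ((b.length : Int)) ≤ l := le_of_not_gt hgt
        have hmax : max l ((b.length : Int)) = l := max_eq_left hle
        have hlml : l ≤ ml := by
          rw [hM]; exact le_trans (le_max_left _ _) (fsl_le_M _ _)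
        by_cases heq : ((b.length : Int)) = l
        · -- same length: maybe improve the strength
          have hstep : fslStepB (l, s) b
              = (l, if b.foldl (fun acc p => acc + (p.1 + p.2)) 0 > s then
                  b.foldl (fun acc p => acc + (p.1 + p.2)) 0 else s) := by
            simp [fslStepB, heq]; split <;> rfl
          rw [hstep, ih ml _ _ (by rw [hM, hmax])]
          have hstepA : fslStepA ml (if l = ml then s else 0) b
              = (if l = ml then (if b.foldl (fun acc p => acc + (p.1 + p.2)) 0 > s then
                  b.foldl (fun acc p => acc + (p.1 + p.2)) 0 else s) else 0) := by
            simp only [fslStepA, hsab, heq]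
            by_cases hlml' : l = ml <;> simp [hlml']
          rw [hstepA]
        · -- shorter bridge: skipped on both sides
          have hstep : fslStepB (l, s) b = (l, s) := by
            simp [fslStepB, hgt, heq]
          have hbml : ((b.length : Int)) ≠ ml := by intro he; omega
          rw [hstep, ih ml _ _ (by rw [hM, hmax])]
          have hstepA : fslStepA ml (if l = ml then s else 0) b = (if l = ml then s else 0) := by
            simp [fslStepA, hbml]
          rw [hstepA]

-- on a nonempty list, A's max?-based max_len equals B's running max from -1
theorem fsl_maxlen (b : List (Int × Int)) (bs : List (List (Int × Int))) :
    (((b :: bs).map (fun a => ((a.length : Int)))).max?).getD 0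
      = (b :: bs).foldl (fun m c => max m ((c.length : Int))) (-1) := by
  simp only [List.map_cons]
  rw [List.max?_cons', Option.getD_some, List.foldl_cons]
  have h1 : max (-1 : Int) (b.length : Int) = (b.length : Int) := by
    apply max_eq_right; omega
  rw [h1, List.foldl_map]

-- ===== VERDICT (by name: the statement is the Claim_ definition above) =====
theorem find_strongest_longest_spec : Claim_equal_find_strongest_longest := by
  intro bridges _ hpre
  unfold Spec_find_strongest_longest find_strongest_longest find_strongest_longest_alt
  obtain ⟨b, bs, rfl⟩ : ∃ b bs, bridges = b :: bs := by
    cases bridges with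
    | nil => exact absurd rfl hpre
    | cons b bs => exact ⟨b, bs, rfl⟩
  show List.foldl (fslStepA ((((b :: bs).map (fun a => ((a.length : Int)))).max?).getD 0)) 0 (b :: bs)
      = (List.foldl fslStepB (-1, 0) (b :: bs)).2
  rw [fsl_key (b :: bs) _ (-1) 0 (fsl_maxlen b bs)]
  simp
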